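-- pv_equiv track=rewrite | github.com/huiseung/Progamming-Digest | algorithm/프로그래머스/lv2_n^2 배열 자르기.py | solution
-- ===== SOURCE A (Python) =====
-- def makeRow(rIdx, start, end):
--     row = []
--     startNum = rIdx + 1
--     duplicatelength = rIdx+1
--     if duplicatelength <= start:
--         for num in range(start, end+1):
--             row.append(num+1)
--     elif duplicatelength > start:
--         if duplicatelength <= end:
--             row = [startNum]*(duplicatelength-start)
--             for num in range(duplicatelength, end+1):
--                 row.append(num+1)
--         elif duplicatelength > end:
--             row = [startNum]*(end-start+1)
--     return row
--
-- def solution(n, left, right):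
--     answer = []
--     leftShare = left//n
--     leftRemainder = left%n
--     rightShare = right//n
--     rightRemainder = right%n
--     if leftShare == rightShare:
--         for num in makeRow(leftShare, leftRemainder, rightRemainder):
--             answer.append(num)
--     elif leftShare < rightShare:
--         for num in makeRow(leftShare, leftRemainder, n-1):
--             answer.append(num)
--         for rIdx in range(leftShare+1, rightShare):
--             for num in makeRow(rIdx, 0, n-1):
--                 answer.append(num)
--         for num in makeRow(rightShare, 0, rightRemainder):
--             answer.append(num)
--     return answer
-- ===== SOURCE B (Python) =====
-- def solution(n, left, right):
--     return [max(k // n, k % n) + 1 for k in range(left, right + 1)]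
-- ===== Notes on version B (the rewrite author's own statement) =====
-- stated objective: simpler
-- what changed: B replaces A's row-by-row construction (makeRow with duplicate-run plus ascending-tail cases and three stitching loops) by one flat comprehension over the output indices k, emitting max(k//n, k%n)+1 directly.
-- outside the precondition, e.g. on solution(-5, -8, -4): A returns [], B returns [2, 2, 2, 2, 1]; on solution(-12, -23, -24): A returns [3], B returns []
import Mathlib
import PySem

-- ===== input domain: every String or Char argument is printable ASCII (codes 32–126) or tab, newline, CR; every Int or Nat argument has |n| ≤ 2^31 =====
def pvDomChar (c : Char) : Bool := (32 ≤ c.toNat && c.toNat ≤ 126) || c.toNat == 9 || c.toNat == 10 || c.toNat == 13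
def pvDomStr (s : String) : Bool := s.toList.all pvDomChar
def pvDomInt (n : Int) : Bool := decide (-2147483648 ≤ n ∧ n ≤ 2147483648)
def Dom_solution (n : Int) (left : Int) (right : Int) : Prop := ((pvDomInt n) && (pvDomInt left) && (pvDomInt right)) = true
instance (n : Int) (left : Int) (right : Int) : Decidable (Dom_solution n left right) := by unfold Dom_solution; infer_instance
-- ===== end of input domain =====

-- B replaces A's row-by-row makeRow machinery by one flat pass over the output
-- indices, emitting max(k//n, k%n)+1 directly (simpler; same asymptotic cost).


-- ===== PORT A =====
def makeRow (rIdx start stop : Int) : List Int :=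
  let row : List Int := []
  let startNum := rIdx + 1
  let duplicatelength := rIdx + 1
  if duplicatelength ≤ start then
    (PySem.List.pyRange start (stop + 1) 1).foldl (fun acc num => acc ++ [num + 1]) row
  else  -- duplicatelength > start
    if duplicatelength ≤ stop then
      let row := PySem.List.pyRepeat [startNum] (duplicatelength - start)
      (PySem.List.pyRange duplicatelength (stop + 1) 1).foldl (fun acc num => acc ++ [num + 1]) row
    else  -- duplicatelength > stop
      PySem.List.pyRepeat [startNum] (stop - start + 1)

def solution (n : Int) (left : Int) (right : Int) : List Int :=
  let answer : List Int := []
  let leftShare := PySem.Int.floordiv left n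
  let leftRemainder := PySem.Int.mod left n
  let rightShare := PySem.Int.floordiv right n
  let rightRemainder := PySem.Int.mod right n
  if leftShare = rightShare then
    (makeRow leftShare leftRemainder rightRemainder).foldl (fun acc num => acc ++ [num]) answer
  else if leftShare < rightShare then
    let answer := (makeRow leftShare leftRemainder (n - 1)).foldl (fun acc num => acc ++ [num]) answer
    let answer := (PySem.List.pyRange (leftShare + 1) rightShare 1).foldl
      (fun acc rIdx => (makeRow rIdx 0 (n - 1)).foldl (fun a num => a ++ [num]) acc) answer
    (makeRow rightShare 0 rightRemainder).foldl (fun acc num => acc ++ [num]) answer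
  else answer

-- ===== PORT B =====
def solution_alt (n : Int) (left : Int) (right : Int) : List Int :=
  (PySem.List.pyRange left (right + 1) 1).map
    (fun k => max (PySem.Int.floordiv k n) (PySem.Int.mod k n) + 1)

-- ===== PRECONDITION & SPEC =====
-- Pre_ excludes n ≤ 0: at n = 0 A raises ZeroDivisionError, and for n < 0 (no n×n
-- array exists) A's returned value is an accident of floor division with a negative
-- divisor driving makeRow outside its intended ranges.
def Pre_solution (n : Int) (left : Int) (right : Int) : Prop := 1 ≤ n
instance (n : Int) (left : Int) (right : Int) : Decidable (Pre_solution n left right) := by unfold Pre_solution; infer_instance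
def pvWitness_solution : Int × Int × Int := (3, 2, 5)

def Spec_solution (n : Int) (left : Int) (right : Int) (out : List Int) : Prop := out = solution_alt n left right
instance (n : Int) (left : Int) (right : Int) (out : List Int) : Decidable (Spec_solution n left right out) := by unfold Spec_solution; infer_instance

-- ===== CLAIM (what is proved, stated in full; the proofs are below) =====
def Claim_equal_solution : Prop := ∀ (n : Int) (left : Int) (right : Int), Dom_solution n left right → Pre_solution n left right → Spec_solution n left right (solution n left right)

-- ===== LEMMAS AND PROOFS =====

-- makeRow r a b lists max r c + 1 for c = a .. b.
theorem makeRow_eq_map (r a b : Int) :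
    makeRow r a b = (PySem.List.pyRange a (b + 1) 1).map (fun c => max r c + 1) := by
  unfold makeRow
  simp only [PySem.List.foldl_append_singleton_eq_map, List.nil_append,
    PySem.List.pyRepeat_singleton]
  split_ifs with h1 h2
  · -- r + 1 <= a : every c in [a, b] has r < c
    refine (List.map_congr_left ?_).symm
    intro c hc
    rw [PySem.List.mem_pyRange_one] at hc
    have hmx : max r c = c := by omega
    rw [hmx]
  · -- a <= r, r + 1 <= b : constant head then ascending tail
    have hsplit : PySem.List.pyRange a (b + 1) 1 =
        PySem.List.pyRange a (r + 1) 1 ++ PySem.List.pyRange (r + 1) (b + 1) 1 :=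
      PySem.List.pyRange_one_append a (r + 1) (b + 1) (by omega) (by omega)
    rw [hsplit, List.map_append]
    congr 1
    · symm
      rw [List.eq_replicate_iff]
      refine ⟨by simp [PySem.List.length_pyRange_one], ?_⟩
      intro x hx
      simp only [List.mem_map] at hx
      obtain ⟨c, hc, rfl⟩ := hx
      rw [PySem.List.mem_pyRange_one] at hc
      have hmx : max r c = r := by omega
      rw [hmx]
    · refine (List.map_congr_left ?_).symm
      intro c hc
      rw [PySem.List.mem_pyRange_one] at hc
      have hmx : max r c = c := by omega
      rw [hmx]
  · -- a <= r, b <= r : all constant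
    symm
    rw [List.eq_replicate_iff]
    refine ⟨by simp [PySem.List.length_pyRange_one]; omega, ?_⟩
    intro x hx
    simp only [List.mem_map] at hx
    obtain ⟨c, hc, rfl⟩ := hx
    rw [PySem.List.mem_pyRange_one] at hc
    have hmx : max r c = r := by omega
    rw [hmx]

-- On a within-row segment, B's cell formula collapses to max q c + 1.
theorem seg_eq_makeRow (n q a b : Int) (hn : 1 ≤ n) (ha : 0 ≤ a) (hb : b ≤ n - 1) :
    (PySem.List.pyRange (q * n + a) (q * n + b + 1) 1).map
        (fun k => max (PySem.Int.floordiv k n) (PySem.Int.mod k n) + 1)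
      = makeRow q a b := by
  rw [makeRow_eq_map]
  rw [PySem.List.pyRange_one, PySem.List.pyRange_one]
  have hlen : (q * n + b + 1 - (q * n + a)).toNat = (b + 1 - a).toNat := by omega
  rw [hlen, List.map_map, List.map_map]
  refine List.map_congr_left ?_
  intro k hk
  rw [List.mem_range] at hk
  simp only [Function.comp_apply]
  have hc : 0 ≤ a + (k : Int) ∧ a + (k : Int) ≤ b := by omega
  have hdiv : PySem.Int.floordiv (q * n + a + (k : Int)) n = q := by
    rw [PySem.Int.floordiv_eq_ediv_of_pos (by omega)]
    have : q * n + a + (k : Int) = (a + (k : Int)) + q * n := by ring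
    rw [this, Int.add_mul_ediv_right _ _ (by omega : n ≠ 0),
      Int.ediv_eq_zero_of_lt (by omega) (by omega)]
    omega
  have hmod : PySem.Int.mod (q * n + a + (k : Int)) n = a + (k : Int) := by
    rw [PySem.Int.mod_eq_emod_of_pos (by omega)]
    have : q * n + a + (k : Int) = (a + (k : Int)) + q * n := by ring
    rw [this]
    have hre : (a + (k : Int) + q * n) % n = (a + (k : Int)) % n := by
      simpa using Int.add_mul_emod_self_left (a := a + (k : Int)) (b := n) (c := q)
    rw [hre]
    exact Int.emod_eq_of_lt (by omega) (by omega)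
  rw [hdiv, hmod]

-- The middle full rows, flattened.
theorem middle_rows (n : Int) (hn : 1 ≤ n) : ∀ (m : Nat) (q : Int),
    (PySem.List.pyRange (q * n) ((q + (m : Int)) * n) 1).map
        (fun k => max (PySem.Int.floordiv k n) (PySem.Int.mod k n) + 1)
      = (PySem.List.pyRange q (q + (m : Int)) 1).flatMap (fun r => makeRow r 0 (n - 1)) := by
  intro m
  induction m with
  | zero =>
    intro q
    simp [PySem.List.pyRange_one_eq_nil]
  | succ m ih =>
    intro q
    have h1 : PySem.List.pyRange (q * n) ((q + ((m : Int) + 1)) * n) 1 =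
        PySem.List.pyRange (q * n) ((q + 1) * n) 1 ++
        PySem.List.pyRange ((q + 1) * n) ((q + 1 + (m : Int)) * n) 1 := by
      have := PySem.List.pyRange_one_append (q * n) ((q + 1) * n) ((q + ((m : Int) + 1)) * n)
        (by nlinarith) (by nlinarith)
      rw [this]
      congr 2
      ring
    have h2 : PySem.List.pyRange q (q + ((m : Int) + 1)) 1 =
        q :: PySem.List.pyRange (q + 1) (q + 1 + (m : Int)) 1 := by
      rw [PySem.List.pyRange_one_cons (by omega)]
      congr 1
      ring
    push_cast at h1 h2 ⊢
    rw [h1, h2, List.map_append, List.flatMap_cons]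
    congr 1
    · have e : (q + 1) * n = q * n + (n - 1) + 1 := by ring
      rw [e]
      have := seg_eq_makeRow n q 0 (n - 1) hn le_rfl le_rfl
      simpa using this
    · have := ih (q + 1)
      push_cast at this
      exact this

theorem solution_eq (n left right : Int) (hn : 1 ≤ n) :
    solution n left right = solution_alt n left right := by
  unfold solution solution_alt
  simp only [PySem.List.foldl_append_singleton_eq_self, List.nil_append]
  set lq := PySem.Int.floordiv left n with hlq
  set lr := PySem.Int.mod left n with hlr
  set rq := PySem.Int.floordiv right n with hrq
  set rr := PySem.Int.mod right n with hrr
  have hne : n ≠ 0 := by omega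
  have hleft : lq * n + lr = left := by
    rw [hlq, hlr]; have := PySem.Int.floordiv_mul_add_mod left n; linarith
  have hright : rq * n + rr = right := by
    rw [hrq, hrr]; have := PySem.Int.floordiv_mul_add_mod right n; linarith
  have hlrb : 0 ≤ lr ∧ lr ≤ n - 1 := by
    rw [hlr, PySem.Int.mod_eq_emod_of_pos (by omega)]
    constructor
    · exact Int.emod_nonneg left hne
    · have := Int.emod_lt_of_pos left (by omega : 0 < n); omega
  have hrrb : 0 ≤ rr ∧ rr ≤ n - 1 := by
    rw [hrr, PySem.Int.mod_eq_emod_of_pos (by omega)]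
    constructor
    · exact Int.emod_nonneg right hne
    · have := Int.emod_lt_of_pos right (by omega : 0 < n); omega
  split_ifs with h1 h2
  · -- one row
    rw [← hleft, ← hright, h1]
    exact (seg_eq_makeRow n rq lr rr hn hlrb.1 hrrb.2).symm
  · -- lq < rq
    have hm : ∃ m : Nat, rq = lq + 1 + (m : Int) := ⟨(rq - lq - 1).toNat, by omega⟩
    obtain ⟨m, hmq⟩ := hm
    have hsplit : PySem.List.pyRange left (right + 1) 1 =
        PySem.List.pyRange (lq * n + lr) (lq * n + (n - 1) + 1) 1 ++
        (PySem.List.pyRange ((lq + 1) * n) (rq * n) 1 ++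
         PySem.List.pyRange (rq * n) (rq * n + rr + 1) 1) := by
      rw [← hleft, ← hright]
      have e1 : lq * n + (n - 1) + 1 = (lq + 1) * n := by ring
      have hB : (lq + 1) * n ≤ rq * n := by nlinarith
      rw [PySem.List.pyRange_one_append (lq * n + lr) ((lq + 1) * n) (rq * n + rr + 1)
        (by omega) (by omega),
        PySem.List.pyRange_one_append ((lq + 1) * n) (rq * n) (rq * n + rr + 1) hB (by omega)]
      rw [e1]
    rw [PySem.List.foldl_append_eq_flatMap]
    rw [hsplit, List.map_append, List.map_append]
    rw [seg_eq_makeRow n lq lr (n - 1) hn hlrb.1 le_rfl]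
    have hseg3 : (PySem.List.pyRange (rq * n) (rq * n + rr + 1) 1).map
        (fun k => max (PySem.Int.floordiv k n) (PySem.Int.mod k n) + 1) = makeRow rq 0 rr := by
      have := seg_eq_makeRow n rq 0 rr hn le_rfl hrrb.2
      simpa using this
    rw [hseg3]
    have hmid := middle_rows n hn m (lq + 1)
    rw [← hmq] at hmid
    rw [hmid, List.append_assoc]
  · -- lq > rq : both empty
    have hlt : right < left := by
      by_contra hcon
      rw [not_lt] at hcon
      have hle : lq ≤ rq := by
        rw [hlq, hrq, PySem.Int.floordiv_eq_ediv_of_pos (by omega),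
          PySem.Int.floordiv_eq_ediv_of_pos (by omega)]
        exact Int.ediv_le_ediv (by omega) hcon
      omega
    rw [PySem.List.pyRange_one_eq_nil (by omega), List.map_nil]

-- ===== VERDICT (by name: the statement is the Claim_ definition above) =====
theorem solution_spec : Claim_equal_solution := by
  intro n left right _ hpre
  exact solution_eq n left right hpre
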